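-- pv_equiv track=rewrite | github.com/lishouxian/LeetCode | 比赛/214周赛/3.py | maxProfit
-- ===== SOURCE A (Python) =====
-- def maxProfit(inventory, orders: int) -> int:
--     inventory.append(0)
--     inventory.sort()
--     ssum = 0
--     for i in range(len(inventory) - 1, 0, -1):
--
--         if orders >= (len(inventory) - i) * (inventory[i] - inventory[i - 1]):
--             ssum += (len(inventory) - i) * (inventory[i] - inventory[i - 1]) \
--                     * (inventory[i] + inventory[i - 1] + 1) //2
--             orders -= (len(inventory) - i) * (inventory[i] - inventory[i - 1])
--             ssum = ssum % (10 ** 9 + 7)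
--         else:
--             largenum = orders // (len(inventory) - i) + 1
--             largeaccount = orders % (len(inventory) - i)
--             smallnum = orders // (len(inventory) - i)
--             smallaccount = (len(inventory) - i) - largeaccount
--
--             temp = inventory[i]
--             ssum += largeaccount * (largenum) * (2 * temp - largenum + 1) // 2 + \
--                     smallaccount * (smallnum) * (2 * temp - smallnum + 1) // 2
--             ssum = ssum % (10 ** 9 + 7)
--             return ssum
--     return ssum
-- ===== SOURCE B (Python) =====
-- def maxProfit(inventory, orders: int) -> int:
--     MOD = 10 ** 9 + 7
--     inventory.append(0)
--     inventory.sort()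
--     if orders < 0:
--         return 0
--
--     def sold(t):
--         # balls sold when every color is reduced down to level t
--         return sum(c - t for c in inventory if c > t)
--
--     # smallest threshold t in [min, max] with sold(t) <= orders (binary search on the answer)
--     lo, hi = inventory[0], inventory[-1]
--     while lo < hi:
--         mid = (lo + hi) // 2
--         if sold(mid) <= orders:
--             hi = mid
--         else:
--             lo = mid + 1
--     t = lo
--     profit = sum((c - t) * (c + t + 1) // 2 for c in inventory if c > t)
--     if t > inventory[0]:
--         profit += (orders - sold(t)) * t
--     return profit % MOD
-- ===== Notes on version B (the rewrite author's own statement) =====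
-- stated objective: alternative
-- what changed: Replaces A's top-down incremental band sweep with an early return mid-band by a binary search for the smallest selling threshold followed by one aggregate arithmetic-series pass.
-- intended difference: For negative orders on a nonempty inventory A returns a garbage value obtained by selling a negative number of balls (e.g. 1000000004 on ([2], -1)); B returns 0, the profit of selling nothing, which is the intended value since there are no orders to fill. — e.g. on maxProfit([2], -1): A returns 1000000004, B returns 0
import Mathlib
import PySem

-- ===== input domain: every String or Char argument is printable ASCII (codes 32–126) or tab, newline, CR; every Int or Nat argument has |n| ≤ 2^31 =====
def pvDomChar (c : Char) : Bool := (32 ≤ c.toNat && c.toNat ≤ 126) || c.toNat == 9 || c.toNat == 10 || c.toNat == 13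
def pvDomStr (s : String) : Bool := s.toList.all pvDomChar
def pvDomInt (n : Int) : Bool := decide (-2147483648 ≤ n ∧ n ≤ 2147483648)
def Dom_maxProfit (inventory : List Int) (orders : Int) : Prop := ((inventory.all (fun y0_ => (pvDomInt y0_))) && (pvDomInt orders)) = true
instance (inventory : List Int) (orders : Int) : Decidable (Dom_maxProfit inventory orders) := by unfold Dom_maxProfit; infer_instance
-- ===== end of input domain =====

-- B replaces A's top-down incremental band sweep by a binary search for the smallest selling
-- threshold plus one aggregate arithmetic-series pass (alternative decomposition, not faster).
-- Both A and B mutate the argument list the same way (append 0, sort ascending); the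
-- equivalence proved here is about the RETURN value.

-- ===== PORT A =====
-- the loop 'for i in range(len(inventory) - 1, 0, -1)', with the early return of the else branch;
-- indices i and i-1 are always in range (the list is nonempty), so List.getD is exact here
def maxProfitLoop (inv : List Int) (i : Nat) (orders ssum : Int) : Int :=
  match i with
  | 0 => ssum
  | i' + 1 =>
    let w : Int := (inv.length : Int) - ((i' : Int) + 1)
    let hi := inv.getD (i' + 1) 0
    let lo := inv.getD i' 0
    if w * (hi - lo) ≤ orders then
      maxProfitLoop inv i' (orders - w * (hi - lo))
        (PySem.Int.mod (ssum + PySem.Int.floordiv (w * (hi - lo) * (hi + lo + 1)) 2) 1000000007)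
    else
      let largenum := PySem.Int.floordiv orders w + 1
      let largeaccount := PySem.Int.mod orders w
      let smallnum := PySem.Int.floordiv orders w
      let smallaccount := w - largeaccount
      PySem.Int.mod (ssum + (PySem.Int.floordiv (largeaccount * largenum * (2 * hi - largenum + 1)) 2
        + PySem.Int.floordiv (smallaccount * smallnum * (2 * hi - smallnum + 1)) 2)) 1000000007

def maxProfit (inventory : List Int) (orders : Int) : Int :=
  let inv := PySem.List.sorted (inventory ++ [0]) (fun x => x) false
  maxProfitLoop inv (inv.length - 1) orders 0

-- ===== PORT B =====
-- Source B's sold(t): sum(c - t for c in inventory if c > t)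
def pvSold (inv : List Int) (t : Int) : Int :=
  ((inv.filter (fun c => t < c)).map (fun c => c - t)).sum

-- Source B's 'while lo < hi' binary search (totality: the interval length decreases)
def pvSearch (inv : List Int) (orders lo hi : Int) : Int :=
  if h : lo < hi then
    let mid := PySem.Int.floordiv (lo + hi) 2
    if pvSold inv mid ≤ orders then pvSearch inv orders lo mid
    else pvSearch inv orders (mid + 1) hi
  else lo
termination_by (hi - lo).toNat
decreasing_by
  · have h2 := (PySem.Int.floordiv_lt_iff_lt_mul (a := lo + hi) (b := 2) (q := hi) (by norm_num)).2 (by omega)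
    omega
  · have h1 := (PySem.Int.le_floordiv_iff_mul_le (a := lo + hi) (b := 2) (q := lo) (by norm_num)).2 (by omega)
    have h2 := (PySem.Int.floordiv_lt_iff_lt_mul (a := lo + hi) (b := 2) (q := hi) (by norm_num)).2 (by omega)
    omega

-- inventory[0] and inventory[-1] are exact as getD: the list is nonempty after the append
def maxProfit_alt (inventory : List Int) (orders : Int) : Int :=
  let inv := PySem.List.sorted (inventory ++ [0]) (fun x => x) false
  if orders < 0 then 0
  else
    let t := pvSearch inv orders (inv.getD 0 0) (inv.getD (inv.length - 1) 0)
    let profit := ((inv.filter (fun c => t < c)).map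
      (fun c => PySem.Int.floordiv ((c - t) * (c + t + 1)) 2)).sum
    let profit := if inv.getD 0 0 < t then profit + (orders - pvSold inv t) * t else profit
    PySem.Int.mod profit 1000000007

-- ===== PRECONDITION & SPEC =====
-- For negative orders on a nonempty inventory A returns a garbage value obtained by selling a
-- negative number of balls (e.g. 1000000004 on ([2], -1)); B returns 0, the profit of selling
-- nothing, which is the intended value since there are no orders to fill.
def D_maxProfit (inventory : List Int) (orders : Int) : Prop := orders < 0 ∧ inventory ≠ []
instance (inventory : List Int) (orders : Int) : Decidable (D_maxProfit inventory orders) := by unfold D_maxProfit; infer_instance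

def Spec_maxProfit (inventory : List Int) (orders : Int) (out : Int) : Prop :=
  ¬ D_maxProfit inventory orders → out = maxProfit_alt inventory orders
instance (inventory : List Int) (orders : Int) (out : Int) : Decidable (Spec_maxProfit inventory orders out) := by unfold Spec_maxProfit; infer_instance

def pvDiffWitness_maxProfit : List Int × Int := ([2], -1)
def pvDiffWitnessOut_maxProfit : Int × Int := (1000000004, 0)

-- ===== CLAIM (what is proved, stated in full; the proofs are below) =====
def Claim_unchanged_maxProfit : Prop := ∀ (inventory : List Int) (orders : Int), Dom_maxProfit inventory orders → Spec_maxProfit inventory orders (maxProfit inventory orders)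
def Claim_changed_maxProfit : Prop := Dom_maxProfit (pvDiffWitness_maxProfit.1) (pvDiffWitness_maxProfit.2) ∧ D_maxProfit (pvDiffWitness_maxProfit.1) (pvDiffWitness_maxProfit.2) ∧ maxProfit (pvDiffWitness_maxProfit.1) (pvDiffWitness_maxProfit.2) = pvDiffWitnessOut_maxProfit.1 ∧ maxProfit_alt (pvDiffWitness_maxProfit.1) (pvDiffWitness_maxProfit.2) = pvDiffWitnessOut_maxProfit.2 ∧ pvDiffWitnessOut_maxProfit.1 ≠ pvDiffWitnessOut_maxProfit.2

-- ===== LEMMAS AND PROOFS =====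

-- the profit sum of B, named for the proofs (same term as in maxProfit_alt)
def pvProfit (inv : List Int) (t : Int) : Int :=
  ((inv.filter (fun c => t < c)).map (fun c => PySem.Int.floordiv ((c - t) * (c + t + 1)) 2)).sum

theorem pv_even_tri (a b : Int) : 2 ∣ (a - b) * (a + b + 1) := by
  rcases Int.even_or_odd (a - b) with ⟨k, hk⟩ | ⟨k, hk⟩
  · exact ⟨k * (a + b + 1), by rw [show a - b = 2 * k by omega]; ring⟩
  · exact ⟨(a - b) * (k + b + 1), by rw [show a + b + 1 = 2 * (k + b + 1) by omega]; ring⟩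

theorem pv_fd_two_mul (m : Int) : PySem.Int.floordiv (2 * m) 2 = m := by
  rw [PySem.Int.floordiv_eq_ediv_of_pos (by norm_num)]
  omega

theorem pv_two_fd (x : Int) (h : 2 ∣ x) : 2 * PySem.Int.floordiv x 2 = x := by
  obtain ⟨m, rfl⟩ := h
  rw [pv_fd_two_mul]

theorem pv_modM_add (a b : Int) :
    PySem.Int.mod (PySem.Int.mod a 1000000007 + b) 1000000007 = PySem.Int.mod (a + b) 1000000007 := by
  rw [PySem.Int.mod_eq_emod_of_pos (by norm_num), PySem.Int.mod_eq_emod_of_pos (by norm_num),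
      PySem.Int.mod_eq_emod_of_pos (by norm_num), Int.add_emod, Int.emod_emod_of_dvd _ dvd_rfl,
      ← Int.add_emod]

theorem pv_sum_map_filter (f : Int → Int) (p : Int → Bool) (l : List Int) :
    ((l.filter p).map f).sum = (l.map (fun c => if p c then f c else 0)).sum := by
  induction l with
  | nil => rfl
  | cons x l ih => by_cases h : p x <;> simp [h, ih]

theorem pv_sold_eq_summax (inv : List Int) (t : Int) :
    pvSold inv t = (inv.map (fun c => max (c - t) 0)).sum := by
  rw [pvSold, pv_sum_map_filter]
  congr 1
  apply List.map_congr_left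
  intro c _
  by_cases h : t < c
  · simp [h]; omega
  · simp [h]; omega

theorem pv_fd_zero : PySem.Int.floordiv 0 2 = 0 := by
  rw [PySem.Int.floordiv_eq_ediv_of_pos (by norm_num)]
  exact Int.zero_ediv 2

theorem pv_profit_eq_sumite (inv : List Int) (t : Int) :
    pvProfit inv t = (inv.map (fun c => if t ≤ c then PySem.Int.floordiv ((c - t) * (c + t + 1)) 2 else 0)).sum := by
  rw [pvProfit, pv_sum_map_filter]
  congr 1
  apply List.map_congr_left
  intro c _
  by_cases h : t < c
  · rw [if_pos (by simpa using h), if_pos (le_of_lt h)]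
  · rw [if_neg (by simpa using h)]
    by_cases h' : t ≤ c
    · have : c = t := by omega
      subst this
      rw [if_pos le_rfl, sub_self, zero_mul, pv_fd_zero]
    · rw [if_neg h']

theorem pv_sold_antitone (inv : List Int) {t u : Int} (h : t ≤ u) : pvSold inv u ≤ pvSold inv t := by
  rw [pv_sold_eq_summax, pv_sold_eq_summax]
  apply List.sum_le_sum
  intro c _
  omega

theorem pv_sold_top (inv : List Int) (m : Int) (h : ∀ c ∈ inv, c ≤ m) : pvSold inv m = 0 := by
  rw [pv_sold_eq_summax]
  apply List.sum_eq_zero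
  intro x hx
  simp only [List.mem_map] at hx
  obtain ⟨c, hc, rfl⟩ := hx
  have := h c hc
  omega

theorem pv_profit_top (inv : List Int) (m : Int) (h : ∀ c ∈ inv, c ≤ m) : pvProfit inv m = 0 := by
  rw [pv_profit_eq_sumite]
  apply List.sum_eq_zero
  intro x hx
  simp only [List.mem_map] at hx
  obtain ⟨c, hc, rfl⟩ := hx
  have hcm := h c hc
  by_cases hmc : m ≤ c
  · have : c = m := le_antisymm hcm hmc
    subst this
    simp [PySem.Int.floordiv]
  · simp [hmc]

-- the unique point r with pvSold r ≤ orders and (r = m or pvSold (r-1) > orders), r ≥ m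
theorem pv_r_unique (inv : List Int) (orders r1 r2 m : Int)
    (hm1 : m ≤ r1) (hm2 : m ≤ r2)
    (hS1 : pvSold inv r1 ≤ orders) (hS2 : pvSold inv r2 ≤ orders)
    (hmin1 : r1 = m ∨ orders < pvSold inv (r1 - 1))
    (hmin2 : r2 = m ∨ orders < pvSold inv (r2 - 1)) : r1 = r2 := by
  rcases lt_trichotomy r1 r2 with h | h | h
  · rcases hmin2 with rfl | h2
    · omega
    · have := pv_sold_antitone inv (show r1 ≤ r2 - 1 by omega)
      omega
  · exact h
  · rcases hmin1 with rfl | h1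
    · omega
    · have := pv_sold_antitone inv (show r2 ≤ r1 - 1 by omega)
      omega

theorem pvSearch_spec (inv : List Int) (orders : Int) :
    ∀ (n : Nat) (lo hi : Int), (hi - lo).toNat ≤ n → lo ≤ hi → pvSold inv hi ≤ orders →
    lo ≤ pvSearch inv orders lo hi ∧ pvSearch inv orders lo hi ≤ hi ∧
    pvSold inv (pvSearch inv orders lo hi) ≤ orders ∧
    (pvSearch inv orders lo hi = lo ∨ orders < pvSold inv (pvSearch inv orders lo hi - 1)) := by
  intro n
  induction n with
  | zero =>
    intro lo hi hn hlh hhi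
    have heq : lo = hi := by omega
    subst heq
    rw [pvSearch]
    simp only [lt_irrefl, dite_false]
    exact ⟨le_rfl, le_rfl, hhi, Or.inl trivial⟩
  | succ n ih =>
    intro lo hi hn hlh hhi
    by_cases h : lo < hi
    · have hmid1 : lo ≤ PySem.Int.floordiv (lo + hi) 2 :=
        (PySem.Int.le_floordiv_iff_mul_le (by norm_num)).2 (by omega)
      have hmid2 : PySem.Int.floordiv (lo + hi) 2 < hi :=
        (PySem.Int.floordiv_lt_iff_lt_mul (by norm_num)).2 (by omega)
      have heq : pvSearch inv orders lo hi =
          if pvSold inv (PySem.Int.floordiv (lo + hi) 2) ≤ orders then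
            pvSearch inv orders lo (PySem.Int.floordiv (lo + hi) 2)
          else pvSearch inv orders (PySem.Int.floordiv (lo + hi) 2 + 1) hi := by
        rw [pvSearch]
        simp only [h, dite_true]
      by_cases hcut : pvSold inv (PySem.Int.floordiv (lo + hi) 2) ≤ orders
      · rw [heq, if_pos hcut]
        have := ih lo (PySem.Int.floordiv (lo + hi) 2) (by omega) hmid1 hcut
        exact ⟨this.1, le_trans this.2.1 (le_of_lt hmid2), this.2.2⟩
      · rw [heq, if_neg hcut]
        have := ih (PySem.Int.floordiv (lo + hi) 2 + 1) hi (by omega) (by omega) hhi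
        refine ⟨by omega, this.2.1, this.2.2.1, ?_⟩
        rcases this.2.2.2 with h' | h'
        · right
          rw [h']
          simpa using not_le.1 hcut
        · exact Or.inr h'
    · rw [pvSearch]
      simp only [h, dite_false]
      have heq : lo = hi := le_antisymm hlh (not_lt.1 h)
      exact ⟨le_rfl, hlh, heq ▸ hhi, Or.inl trivial⟩

theorem pv_take_le (l : List Int) (hs : l.Pairwise (· ≤ ·)) (m : Nat) (hm : m ≤ l.length)
    (hm0 : 0 < m) : ∀ c ∈ l.take m, c ≤ l.getD (m - 1) 0 := by
  intro c hc
  obtain ⟨j, hj, rfl⟩ := List.mem_iff_getElem.1 hc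
  have hjl : j < m := by
    have := hj
    simp [List.length_take] at this
    omega
  have hjlen : j < l.length := by omega
  have hm1 : m - 1 < l.length := by omega
  rw [List.getElem_take, List.getD_eq_getElem l 0 hm1]
  rcases Nat.lt_or_ge j (m - 1) with hcase | hcase
  · exact List.pairwise_iff_getElem.1 hs j (m - 1) hjlen hm1 hcase
  · have : j = m - 1 := by omega
    subst this
    exact le_rfl

theorem pv_drop_ge (l : List Int) (hs : l.Pairwise (· ≤ ·)) (m : Nat) (hm : m < l.length) :
    ∀ c ∈ l.drop m, l.getD m 0 ≤ c := by
  intro c hc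
  obtain ⟨j, hj, rfl⟩ := List.mem_iff_getElem.1 hc
  have hjlen : m + j < l.length := by
    have := hj
    simp [List.length_drop] at this
    omega
  rw [List.getElem_drop, List.getD_eq_getElem l 0 hm]
  rcases Nat.eq_zero_or_pos j with rfl | hj0
  · exact le_rfl
  · exact List.pairwise_iff_getElem.1 hs m (m + j) hm hjlen (by omega)

theorem pv_getD_mono (l : List Int) (hs : l.Pairwise (· ≤ ·)) {p q : Nat} (hpq : p ≤ q)
    (hq : q < l.length) : l.getD p 0 ≤ l.getD q 0 := by
  have hp : p < l.length := by omega
  rw [List.getD_eq_getElem l 0 hp, List.getD_eq_getElem l 0 hq]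
  rcases Nat.lt_or_ge p q with hcase | hcase
  · exact List.pairwise_iff_getElem.1 hs p q hp hq hcase
  · have : p = q := by omega
    subst this
    exact le_rfl

theorem pv_map_sub_shift (l : List Int) (t hi : Int) :
    (l.map (fun c => c - t)).sum = (l.map (fun c => c - hi)).sum + (l.length : Int) * (hi - t) := by
  induction l with
  | nil => simp
  | cons x l ih =>
    simp only [List.map_cons, List.sum_cons, List.length_cons, ih]
    push_cast
    ring

theorem pv_fd_add (x y : Int) (hx : 2 ∣ x) (hy : 2 ∣ y) :
    PySem.Int.floordiv (x + y) 2 = PySem.Int.floordiv x 2 + PySem.Int.floordiv y 2 := by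
  have h1 := pv_two_fd x hx
  have h2 := pv_two_fd y hy
  have h3 := pv_two_fd (x + y) (dvd_add hx hy)
  omega

theorem pv_fd_tri_split (c t hi : Int) :
    PySem.Int.floordiv ((c - t) * (c + t + 1)) 2
      = PySem.Int.floordiv ((c - hi) * (c + hi + 1)) 2
        + PySem.Int.floordiv ((hi - t) * (hi + t + 1)) 2 := by
  rw [show (c - t) * (c + t + 1) = (c - hi) * (c + hi + 1) + (hi - t) * (hi + t + 1) by ring]
  exact pv_fd_add _ _ (pv_even_tri c hi) (pv_even_tri hi t)

theorem pv_map_fd_shift (l : List Int) (t hi : Int) :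
    (l.map (fun c => PySem.Int.floordiv ((c - t) * (c + t + 1)) 2)).sum
      = (l.map (fun c => PySem.Int.floordiv ((c - hi) * (c + hi + 1)) 2)).sum
        + (l.length : Int) * PySem.Int.floordiv ((hi - t) * (hi + t + 1)) 2 := by
  induction l with
  | nil => simp
  | cons x l ih =>
    simp only [List.map_cons, List.sum_cons, List.length_cons, ih, pv_fd_tri_split x t hi]
    push_cast
    ring

theorem pv_sold_split (inv : List Int) (i : Nat) (u : Int)
    (h1 : ∀ c ∈ inv.take i, c ≤ u) (h2 : ∀ c ∈ inv.drop i, u ≤ c) :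
    pvSold inv u = ((inv.drop i).map (fun c => c - u)).sum := by
  rw [pv_sold_eq_summax]
  conv_lhs => rw [← List.take_append_drop i inv]
  rw [List.map_append, List.sum_append]
  have hz : ((inv.take i).map (fun c => max (c - u) 0)).sum = 0 := by
    apply List.sum_eq_zero
    intro x hx
    simp only [List.mem_map] at hx
    obtain ⟨c, hc, rfl⟩ := hx
    have := h1 c hc
    omega
  rw [hz, zero_add]
  congr 1
  apply List.map_congr_left
  intro c hc
  have := h2 c hc
  omega

theorem pv_profit_split (inv : List Int) (i : Nat) (u : Int)
    (h1 : ∀ c ∈ inv.take i, c ≤ u) (h2 : ∀ c ∈ inv.drop i, u ≤ c) :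
    pvProfit inv u = ((inv.drop i).map (fun c => PySem.Int.floordiv ((c - u) * (c + u + 1)) 2)).sum := by
  rw [pv_profit_eq_sumite]
  conv_lhs => rw [← List.take_append_drop i inv]
  rw [List.map_append, List.sum_append]
  have hz : ((inv.take i).map (fun c => if u ≤ c then PySem.Int.floordiv ((c - u) * (c + u + 1)) 2 else 0)).sum = 0 := by
    apply List.sum_eq_zero
    intro x hx
    simp only [List.mem_map] at hx
    obtain ⟨c, hc, rfl⟩ := hx
    have hcu := h1 c hc
    by_cases h' : u ≤ c
    · have : c = u := le_antisymm hcu h'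
      subst this
      rw [if_pos le_rfl, sub_self, zero_mul, pv_fd_zero]
    · rw [if_neg h']
  rw [hz, zero_add]
  congr 1
  apply List.map_congr_left
  intro c hc
  rw [if_pos (h2 c hc)]

theorem pv_sold_level (inv : List Int) (i : Nat) (t hi : Int) (hth : t ≤ hi)
    (h1 : ∀ c ∈ inv.take i, c ≤ t) (h2 : ∀ c ∈ inv.drop i, hi ≤ c) :
    pvSold inv t = pvSold inv hi + ((inv.drop i).length : Int) * (hi - t) := by
  rw [pv_sold_split inv i t h1 (fun c hc => le_trans hth (h2 c hc)),
      pv_sold_split inv i hi (fun c hc => le_trans (h1 c hc) hth) h2]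
  exact pv_map_sub_shift _ t hi

theorem pv_profit_level (inv : List Int) (i : Nat) (t hi : Int) (hth : t ≤ hi)
    (h1 : ∀ c ∈ inv.take i, c ≤ t) (h2 : ∀ c ∈ inv.drop i, hi ≤ c) :
    pvProfit inv t = pvProfit inv hi
      + ((inv.drop i).length : Int) * PySem.Int.floordiv ((hi - t) * (hi + t + 1)) 2 := by
  rw [pv_profit_split inv i t h1 (fun c hc => le_trans hth (h2 c hc)),
      pv_profit_split inv i hi (fun c hc => le_trans (h1 c hc) hth) h2]
  exact pv_map_fd_shift _ t hi

-- the main loop invariant of A: entering iteration i with the orders and profit already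
-- accumulated down to level inv[i], the loop computes B's closed form at the threshold r
theorem pv_loopA_eq (inv : List Int) (orders r : Int)
    (hs : inv.Pairwise (· ≤ ·))
    (hr0 : inv.getD 0 0 ≤ r)
    (hrS : pvSold inv r ≤ orders)
    (hrMin : r = inv.getD 0 0 ∨ orders < pvSold inv (r - 1)) :
    ∀ i : Nat, i < inv.length → pvSold inv (inv.getD i 0) ≤ orders →
    maxProfitLoop inv i (orders - pvSold inv (inv.getD i 0))
        (PySem.Int.mod (pvProfit inv (inv.getD i 0)) 1000000007)
      = PySem.Int.mod (pvProfit inv r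
          + (if inv.getD 0 0 < r then (orders - pvSold inv r) * r else 0)) 1000000007 := by
  intro i
  induction i with
  | zero =>
    intro _ hS0
    have hre : r = inv.getD 0 0 :=
      pv_r_unique inv orders r (inv.getD 0 0) (inv.getD 0 0) hr0 le_rfl hrS hS0 hrMin (Or.inl rfl)
    rw [maxProfitLoop, hre, if_neg (lt_irrefl _), add_zero]
  | succ i ih =>
    intro hi1 hS
    have hii : i < inv.length := by omega
    have hle : inv.getD i 0 ≤ inv.getD (i + 1) 0 := pv_getD_mono inv hs (by omega) hi1
    have hlen : ((inv.drop (i + 1)).length : Int) = (inv.length : Int) - ((i : Int) + 1) := by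
      rw [List.length_drop]
      omega
    have h1 : ∀ c ∈ inv.take (i + 1), c ≤ inv.getD i 0 := by
      have := pv_take_le inv hs (i + 1) (by omega) (by omega)
      simpa using this
    have h2 : ∀ c ∈ inv.drop (i + 1), inv.getD (i + 1) 0 ≤ c := pv_drop_ge inv hs (i + 1) hi1
    have hbS : pvSold inv (inv.getD i 0)
        = pvSold inv (inv.getD (i + 1) 0)
          + ((inv.length : Int) - ((i : Int) + 1)) * (inv.getD (i + 1) 0 - inv.getD i 0) := by
      rw [pv_sold_level inv (i + 1) (inv.getD i 0) (inv.getD (i + 1) 0) hle h1 h2, hlen]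
    have hbP : pvProfit inv (inv.getD i 0)
        = pvProfit inv (inv.getD (i + 1) 0)
          + ((inv.length : Int) - ((i : Int) + 1))
            * PySem.Int.floordiv ((inv.getD (i + 1) 0 - inv.getD i 0) * (inv.getD (i + 1) 0 + inv.getD i 0 + 1)) 2 := by
      rw [pv_profit_level inv (i + 1) (inv.getD i 0) (inv.getD (i + 1) 0) hle h1 h2, hlen]
    rw [maxProfitLoop]
    by_cases hcond : ((inv.length : Int) - ((i : Int) + 1)) * (inv.getD (i + 1) 0 - inv.getD i 0)
        ≤ orders - pvSold inv (inv.getD (i + 1) 0)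
    · rw [if_pos hcond]
      have harg : orders - pvSold inv (inv.getD (i + 1) 0)
          - ((inv.length : Int) - ((i : Int) + 1)) * (inv.getD (i + 1) 0 - inv.getD i 0)
          = orders - pvSold inv (inv.getD i 0) := by
        rw [hbS]; ring
      have hfd : PySem.Int.floordiv
          (((inv.length : Int) - ((i : Int) + 1)) * (inv.getD (i + 1) 0 - inv.getD i 0)
            * (inv.getD (i + 1) 0 + inv.getD i 0 + 1)) 2
          = ((inv.length : Int) - ((i : Int) + 1))
            * PySem.Int.floordiv ((inv.getD (i + 1) 0 - inv.getD i 0) * (inv.getD (i + 1) 0 + inv.getD i 0 + 1)) 2 := by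
        obtain ⟨m, hm⟩ := pv_even_tri (inv.getD (i + 1) 0) (inv.getD i 0)
        rw [show ((inv.length : Int) - ((i : Int) + 1)) * (inv.getD (i + 1) 0 - inv.getD i 0)
              * (inv.getD (i + 1) 0 + inv.getD i 0 + 1)
            = ((inv.length : Int) - ((i : Int) + 1))
              * ((inv.getD (i + 1) 0 - inv.getD i 0) * (inv.getD (i + 1) 0 + inv.getD i 0 + 1)) by ring,
          hm, show ((inv.length : Int) - ((i : Int) + 1)) * (2 * m)
            = 2 * (((inv.length : Int) - ((i : Int) + 1)) * m) by ring,
          pv_fd_two_mul, pv_fd_two_mul]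
      have hssum : PySem.Int.mod
          (PySem.Int.mod (pvProfit inv (inv.getD (i + 1) 0)) 1000000007
            + PySem.Int.floordiv
              (((inv.length : Int) - ((i : Int) + 1)) * (inv.getD (i + 1) 0 - inv.getD i 0)
                * (inv.getD (i + 1) 0 + inv.getD i 0 + 1)) 2) 1000000007
          = PySem.Int.mod (pvProfit inv (inv.getD i 0)) 1000000007 := by
        rw [pv_modM_add, hfd, ← hbP]
      have hS' : pvSold inv (inv.getD i 0) ≤ orders := by linarith [hbS, hcond]
      rw [harg, hssum]
      exact ih hii hS'
    · rw [if_neg hcond]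
      have hw : (0:Int) < (inv.length : Int) - ((i : Int) + 1) := by omega
      set w : Int := (inv.length : Int) - ((i : Int) + 1) with hwdef
      set hiV := inv.getD (i + 1) 0 with hhiVdef
      set loV := inv.getD i 0 with hloVdef
      set o : Int := orders - pvSold inv hiV with hodef
      set q : Int := PySem.Int.floordiv o w with hqdef
      set la : Int := PySem.Int.mod o w with hladef
      have ho' : 0 ≤ o := by rw [hodef]; linarith [hS]
      have hql : q * w + la = o := PySem.Int.floordiv_mul_add_mod o w
      have hla0 : 0 ≤ la := PySem.Int.mod_nonneg o hw
      have hlaw : la < w := PySem.Int.mod_lt o hw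
      have hq0 : 0 ≤ q := by
        rw [hqdef]
        exact (PySem.Int.le_floordiv_iff_mul_le hw).2 (by linarith)
      have hqd : q < hiV - loV := by
        rw [hqdef]
        refine (PySem.Int.floordiv_lt_iff_lt_mul hw).2 ?_
        have hmc : w * (hiV - loV) = (hiV - loV) * w := mul_comm _ _
        linarith [not_le.1 hcond]
      have h1r : ∀ c ∈ inv.take (i + 1), c ≤ hiV - q := fun c hc => by
        have := h1 c hc
        omega
      have h1r1 : ∀ c ∈ inv.take (i + 1), c ≤ hiV - q - 1 := fun c hc => by
        have := h1 c hc
        omega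
      have hSr : pvSold inv (hiV - q) = pvSold inv hiV + w * q := by
        have h := pv_sold_level inv (i + 1) (hiV - q) hiV (by omega) h1r h2
        rw [hlen, show hiV - (hiV - q) = q from by ring] at h
        exact h
      have hSr1 : pvSold inv (hiV - q - 1) = pvSold inv hiV + w * (q + 1) := by
        have h := pv_sold_level inv (i + 1) (hiV - q - 1) hiV (by omega) h1r1 h2
        rw [hlen, show hiV - (hiV - q - 1) = q + 1 from by ring] at h
        exact h
      have hPr : pvProfit inv (hiV - q) = pvProfit inv hiV
          + w * PySem.Int.floordiv (q * (2 * hiV - q + 1)) 2 := by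
        have h := pv_profit_level inv (i + 1) (hiV - q) hiV (by omega) h1r h2
        rw [hlen, show (hiV - (hiV - q)) * (hiV + (hiV - q) + 1) = q * (2 * hiV - q + 1) from by ring] at h
        exact h
      have hgd0 : inv.getD 0 0 ≤ loV := pv_getD_mono inv hs (Nat.zero_le i) hii
      have hwq : w * q = q * w := mul_comm _ _
      have hre : r = hiV - q := by
        refine pv_r_unique inv orders r (hiV - q) (inv.getD 0 0) hr0 (by omega) hrS ?_ hrMin (Or.inr ?_)
        · rw [hSr]
          linarith
        · rw [hSr1]
          have : w * (q + 1) = q * w + w := by ring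
          linarith
      have e2X : 2 * PySem.Int.floordiv (la * (q + 1) * (2 * hiV - (q + 1) + 1)) 2
          = la * (q + 1) * (2 * hiV - (q + 1) + 1) := by
        apply pv_two_fd
        have hev : 2 ∣ (q + 1) * (2 * hiV - (q + 1) + 1) := by
          have := pv_even_tri hiV (hiV - q - 1)
          rw [show (hiV - (hiV - q - 1)) * (hiV + (hiV - q - 1) + 1)
              = (q + 1) * (2 * hiV - (q + 1) + 1) from by ring] at this
          exact this
        rw [show la * (q + 1) * (2 * hiV - (q + 1) + 1)
            = la * ((q + 1) * (2 * hiV - (q + 1) + 1)) from by ring]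
        exact hev.mul_left la
      have e2Y : 2 * PySem.Int.floordiv ((w - la) * q * (2 * hiV - q + 1)) 2
          = (w - la) * q * (2 * hiV - q + 1) := by
        apply pv_two_fd
        have hev : 2 ∣ q * (2 * hiV - q + 1) := by
          have := pv_even_tri hiV (hiV - q)
          rw [show (hiV - (hiV - q)) * (hiV + (hiV - q) + 1)
              = q * (2 * hiV - q + 1) from by ring] at this
          exact this
        rw [show (w - la) * q * (2 * hiV - q + 1)
            = (w - la) * (q * (2 * hiV - q + 1)) from by ring]
        exact hev.mul_left (w - la)
      have e2H : 2 * PySem.Int.floordiv (q * (2 * hiV - q + 1)) 2 = q * (2 * hiV - q + 1) := by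
        apply pv_two_fd
        have := pv_even_tri hiV (hiV - q)
        rw [show (hiV - (hiV - q)) * (hiV + (hiV - q) + 1)
            = q * (2 * hiV - q + 1) from by ring] at this
        exact this
      rw [hre, if_pos (by omega : inv.getD 0 0 < hiV - q), pv_modM_add]
      congr 1
      rw [hPr, hSr]
      have hXY : 2 * (PySem.Int.floordiv (la * (q + 1) * (2 * hiV - (q + 1) + 1)) 2
            + PySem.Int.floordiv ((w - la) * q * (2 * hiV - q + 1)) 2)
          = 2 * (w * PySem.Int.floordiv (q * (2 * hiV - q + 1)) 2 + la * (hiV - q)) := by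
        calc 2 * (PySem.Int.floordiv (la * (q + 1) * (2 * hiV - (q + 1) + 1)) 2
              + PySem.Int.floordiv ((w - la) * q * (2 * hiV - q + 1)) 2)
            = 2 * PySem.Int.floordiv (la * (q + 1) * (2 * hiV - (q + 1) + 1)) 2
              + 2 * PySem.Int.floordiv ((w - la) * q * (2 * hiV - q + 1)) 2 := by ring
          _ = la * (q + 1) * (2 * hiV - (q + 1) + 1) + (w - la) * q * (2 * hiV - q + 1) := by
              rw [e2X, e2Y]
          _ = w * (q * (2 * hiV - q + 1)) + 2 * (la * (hiV - q)) := by ring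
          _ = w * (2 * PySem.Int.floordiv (q * (2 * hiV - q + 1)) 2) + 2 * (la * (hiV - q)) := by
              rw [e2H]
          _ = 2 * (w * PySem.Int.floordiv (q * (2 * hiV - q + 1)) 2 + la * (hiV - q)) := by ring
      have hXY' : PySem.Int.floordiv (la * (q + 1) * (2 * hiV - (q + 1) + 1)) 2
            + PySem.Int.floordiv ((w - la) * q * (2 * hiV - q + 1)) 2
          = w * PySem.Int.floordiv (q * (2 * hiV - q + 1)) 2 + la * (hiV - q) := by linarith
      have hla' : orders - (pvSold inv hiV + w * q) = la := by
        rw [hodef] at hql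
        linarith
      rw [hla']
      linarith [hXY']

-- ===== VERDICT (by name: the statement is the Claim_ definition above) =====
theorem maxProfit_spec : Claim_unchanged_maxProfit := by
  intro inventory orders _hdom hnd
  by_cases hord : orders < 0
  · have hinv : inventory = [] := by
      by_contra hne
      exact hnd ⟨hord, hne⟩
    subst hinv
    rw [show maxProfit [] orders = 0 from rfl]
    simp [maxProfit_alt, hord]
  · rw [not_lt] at hord
    set invS := PySem.List.sorted (inventory ++ [0]) (fun x => x) false with hinvSdef
    have hsne : invS ≠ [] := by
      rw [hinvSdef, Ne, PySem.List.sorted_eq_nil_iff]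
      simp
    have hs : invS.Pairwise (· ≤ ·) := by
      have h := PySem.List.sorted_pairwise (inventory ++ [0]) (fun x => x)
      rw [← hinvSdef] at h
      exact h
    have hlen : 0 < invS.length := List.length_pos_iff.2 hsne
    have hmax : ∀ c ∈ invS, c ≤ invS.getD (invS.length - 1) 0 := by
      have h := pv_take_le invS hs invS.length le_rfl hlen
      rw [List.take_length] at h
      exact h
    have hS0 : pvSold invS (invS.getD (invS.length - 1) 0) = 0 := pv_sold_top _ _ hmax
    have hP0 : pvProfit invS (invS.getD (invS.length - 1) 0) = 0 := pv_profit_top _ _ hmax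
    have hlh : invS.getD 0 0 ≤ invS.getD (invS.length - 1) 0 :=
      pv_getD_mono invS hs (Nat.zero_le _) (by omega)
    obtain ⟨hr1, hr2, hr3, hr4⟩ :=
      pvSearch_spec invS orders ((invS.getD (invS.length - 1) 0 - invS.getD 0 0).toNat)
        (invS.getD 0 0) (invS.getD (invS.length - 1) 0) le_rfl hlh (by rw [hS0]; exact hord)
    have main := pv_loopA_eq invS orders
      (pvSearch invS orders (invS.getD 0 0) (invS.getD (invS.length - 1) 0)) hs hr1 hr3 hr4
      (invS.length - 1) (by omega) (by rw [hS0]; exact hord)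
    have hmod0 : PySem.Int.mod 0 1000000007 = 0 := by
      rw [PySem.Int.mod_eq_emod_of_pos (by norm_num)]
      rfl
    rw [hS0, hP0, hmod0, sub_zero] at main
    have hL : maxProfit inventory orders = maxProfitLoop invS (invS.length - 1) orders 0 := rfl
    have hR : maxProfit_alt inventory orders
        = PySem.Int.mod
            (if invS.getD 0 0 < pvSearch invS orders (invS.getD 0 0) (invS.getD (invS.length - 1) 0) then
              pvProfit invS (pvSearch invS orders (invS.getD 0 0) (invS.getD (invS.length - 1) 0))
                + (orders - pvSold invS (pvSearch invS orders (invS.getD 0 0) (invS.getD (invS.length - 1) 0)))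
                  * pvSearch invS orders (invS.getD 0 0) (invS.getD (invS.length - 1) 0)
             else pvProfit invS (pvSearch invS orders (invS.getD 0 0) (invS.getD (invS.length - 1) 0)))
            1000000007 := by
      simp only [maxProfit_alt, ← hinvSdef, pvProfit]
      rw [if_neg (not_lt.2 hord)]
    rw [hL, main, hR]
    by_cases hcond : invS.getD 0 0 < pvSearch invS orders (invS.getD 0 0) (invS.getD (invS.length - 1) 0)
    · rw [if_pos hcond, if_pos hcond]
    · rw [if_neg hcond, if_neg hcond, add_zero]

theorem maxProfit_changed : Claim_changed_maxProfit := by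
  unfold Claim_changed_maxProfit
  decide
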